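-- pv_equiv track=rewrite | github.com/brfarlow/AoC2020 | day12.py | part_1_move
-- ===== SOURCE A (Python) =====
-- direction_changes = {'E': {'L': {1: 'N', 2: 'W', 3: 'S'},
--                            'R': {1: 'S', 2: 'W', 3: 'N'}
--                            },
--                      'W': {'L': {1: 'S', 2: 'E', 3: 'N'},
--                            'R': {1: 'N', 2: 'E', 3: 'S'}
--                            },
--                      'N': {'L': {1: 'W', 2: 'S', 3: 'E'},
--                            'R': {1: 'E', 2: 'S', 3: 'W'}
--                            },
--                      'S': {'L': {1: 'E', 2: 'N', 3: 'W'},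
--                            'R': {1: 'W', 2: 'N', 3: 'E'}
--                            },
--                      }
--
-- def change_face(facing, left_or_right, degrees):
--     amount_to_move = degrees // 90
--     return direction_changes[facing][left_or_right][amount_to_move]
--
-- def part_1_move(direction, amount, facing, x_pos, y_pos):
--     if direction == 'N':
--         y_pos += amount
--     elif direction == 'S':
--         y_pos -= amount
--     elif direction == 'E':
--         x_pos += amount
--     elif direction == 'W':
--         x_pos -= amount
--     elif direction == 'L':
--         facing = change_face(facing, direction, amount)
--     elif direction == 'R':
--         facing = change_face(facing, direction, amount)
--     else:  # F
--         return part_1_move(facing, amount, facing, x_pos, y_pos)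
--
--     return x_pos, y_pos, facing
-- ===== SOURCE B (Python) =====
-- VEC = {'N': (0, 1), 'S': (0, -1), 'E': (1, 0), 'W': (-1, 0)}
-- LETTER = {(0, 1): 'N', (0, -1): 'S', (1, 0): 'E', (-1, 0): 'W'}
--
--
-- def part_1_move(direction, amount, facing, x_pos, y_pos):
--     if direction == 'L' or direction == 'R':
--         # rotate the facing, represented as a unit vector, by repeated 90-degree turns
--         dx, dy = VEC[facing]
--         for _ in range(amount // 90 % 4):
--             dx, dy = (-dy, dx) if direction == 'L' else (dy, -dx)
--         return x_pos, y_pos, LETTER[(dx, dy)]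
--     # translation: non-compass letters ('F') move along the current facing
--     dx, dy = VEC[direction] if direction in VEC else VEC[facing]
--     return x_pos + dx * amount, y_pos + dy * amount, facing
-- ===== Notes on version B (the rewrite author's own statement) =====
-- stated objective: alternative
-- what changed: Represents the facing as a unit vector and computes rotations by iterating the 90-degree rotation (dx,dy)->(-dy,dx)/(dy,-dx) instead of A's 24-entry nested lookup table, and handles 'F' by falling through to a vector translation instead of A's recursive re-dispatch.
-- crash fix: When direction is 'L'/'R', facing is a valid compass point and amount//90 is not in {1,2,3} (e.g. amount 0, 45 or 360), A raises KeyError on the innermost table while B rotates by (amount//90) % 4 quarter-turns and returns normally. — e.g. on part_1_move("L", 360, "N", 0, 0): A raises KeyError, B returns (0, 0, "N")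
import Mathlib
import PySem

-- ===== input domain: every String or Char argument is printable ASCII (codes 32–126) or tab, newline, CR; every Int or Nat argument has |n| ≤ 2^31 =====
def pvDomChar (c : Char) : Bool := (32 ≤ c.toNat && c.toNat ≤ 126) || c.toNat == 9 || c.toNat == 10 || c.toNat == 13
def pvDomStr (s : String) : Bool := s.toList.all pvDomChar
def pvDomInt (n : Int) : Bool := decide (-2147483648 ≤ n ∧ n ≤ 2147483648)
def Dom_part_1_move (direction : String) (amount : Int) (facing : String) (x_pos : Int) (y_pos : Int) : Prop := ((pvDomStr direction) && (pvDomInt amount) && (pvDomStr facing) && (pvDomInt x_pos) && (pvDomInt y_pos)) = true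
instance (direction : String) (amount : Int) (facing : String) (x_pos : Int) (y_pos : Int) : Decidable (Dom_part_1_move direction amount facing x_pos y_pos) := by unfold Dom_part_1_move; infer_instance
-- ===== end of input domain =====

-- B represents the facing as a unit vector and rotates it by iterated 90-degree turns,
-- replacing A's 24-entry nested rotation table and recursive 'F' dispatch (objective: alternative).

-- ===== PORT A =====
def direction_changes : PySem.Dict String (PySem.Dict String (PySem.Dict Int String)) :=
  PySem.Dict.ofList
    [("E", PySem.Dict.ofList [("L", PySem.Dict.ofList [(1, "N"), (2, "W"), (3, "S")]),
                              ("R", PySem.Dict.ofList [(1, "S"), (2, "W"), (3, "N")])]),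
     ("W", PySem.Dict.ofList [("L", PySem.Dict.ofList [(1, "S"), (2, "E"), (3, "N")]),
                              ("R", PySem.Dict.ofList [(1, "N"), (2, "E"), (3, "S")])]),
     ("N", PySem.Dict.ofList [("L", PySem.Dict.ofList [(1, "W"), (2, "S"), (3, "E")]),
                              ("R", PySem.Dict.ofList [(1, "E"), (2, "S"), (3, "W")])]),
     ("S", PySem.Dict.ofList [("L", PySem.Dict.ofList [(1, "E"), (2, "N"), (3, "W")]),
                              ("R", PySem.Dict.ofList [(1, "W"), (2, "N"), (3, "E")])])]

-- none = KeyError (outside Pre_)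
def change_face (facing : String) (left_or_right : String) (degrees : Int) : Option String :=
  let amount_to_move := PySem.Int.floordiv degrees 90
  (direction_changes.get? facing).bind fun d1 =>
    (d1.get? left_or_right).bind fun d2 => d2.get? amount_to_move

-- A's recursion ('F' re-dispatches on facing); fuel only makes it total (fuel 2 suffices on
-- every input where the Python returns: the recursive call's direction equals its facing,
-- so a second 'else' branch would recur forever in Python too).
def part_1_move_fuel : Nat → String → Int → String → Int → Int → Option (Int × Int × String)
  | 0, _, _, _, _, _ => none
  | fuel + 1, direction, amount, facing, x_pos, y_pos =>
    if direction = "N" then some (x_pos, y_pos + amount, facing)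
    else if direction = "S" then some (x_pos, y_pos - amount, facing)
    else if direction = "E" then some (x_pos + amount, y_pos, facing)
    else if direction = "W" then some (x_pos - amount, y_pos, facing)
    else if direction = "L" then (change_face facing direction amount).map fun f => (x_pos, y_pos, f)
    else if direction = "R" then (change_face facing direction amount).map fun f => (x_pos, y_pos, f)
    else part_1_move_fuel fuel facing amount facing x_pos y_pos

def part_1_move (direction : String) (amount : Int) (facing : String) (x_pos : Int) (y_pos : Int) : Int × Int × String :=
  (part_1_move_fuel 2 direction amount facing x_pos y_pos).getD (0, 0, "")

-- ===== PORT B =====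
def pvVEC : PySem.Dict String (Int × Int) :=
  PySem.Dict.ofList [("N", (0, 1)), ("S", (0, -1)), ("E", (1, 0)), ("W", (-1, 0))]
def pvLETTER : PySem.Dict (Int × Int) String :=
  PySem.Dict.ofList [((0, 1), "N"), ((0, -1), "S"), ((1, 0), "E"), ((-1, 0), "W")]

-- the for-loop of Source B: apply the 90-degree rotation n times
def pvRotate (direction : String) : Nat → Int × Int → Int × Int
  | 0, v => v
  | n + 1, (dx, dy) => pvRotate direction n (if direction = "L" then (-dy, dx) else (dy, -dx))

def part_1_move_alt (direction : String) (amount : Int) (facing : String) (x_pos : Int) (y_pos : Int) : Int × Int × String :=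
  if direction = "L" ∨ direction = "R" then
    match pvVEC.get? facing with
    | some v =>
      let n := (PySem.Int.mod (PySem.Int.floordiv amount 90) 4).toNat
      match pvLETTER.get? (pvRotate direction n v) with
      | some f => (x_pos, y_pos, f)
      | none => (0, 0, "")  -- unreachable: rotations of a unit vector stay in pvLETTER
    | none => (0, 0, "")    -- KeyError (outside Pre_)
  else
    match (match pvVEC.get? direction with
           | some v => some v
           | none => pvVEC.get? facing) with   -- 'VEC[direction] if direction in VEC else VEC[facing]'
    | some (dx, dy) => (x_pos + dx * amount, y_pos + dy * amount, facing)
    | none => (0, 0, "")    -- KeyError (outside Pre_)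

-- ===== PRECONDITION & SPEC =====
-- Pre_ is exactly the set of inputs on which Python A returns (no exception): a compass move,
-- a rotation with a valid facing and amount//90 in {1,2,3}, or an 'F'-style dispatch onto a
-- valid compass facing.
def Pre_part_1_move (direction : String) (amount : Int) (facing : String) (x_pos : Int) (y_pos : Int) : Prop :=
  (direction = "N" ∨ direction = "S" ∨ direction = "E" ∨ direction = "W")
  ∨ ((direction = "L" ∨ direction = "R")
      ∧ (facing = "E" ∨ facing = "W" ∨ facing = "N" ∨ facing = "S")
      ∧ (PySem.Int.floordiv amount 90 = 1 ∨ PySem.Int.floordiv amount 90 = 2 ∨ PySem.Int.floordiv amount 90 = 3))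
  ∨ (¬(direction = "N" ∨ direction = "S" ∨ direction = "E" ∨ direction = "W" ∨ direction = "L" ∨ direction = "R")
      ∧ (facing = "N" ∨ facing = "S" ∨ facing = "E" ∨ facing = "W"))

instance (direction : String) (amount : Int) (facing : String) (x_pos : Int) (y_pos : Int) : Decidable (Pre_part_1_move direction amount facing x_pos y_pos) := by unfold Pre_part_1_move; infer_instance

def pvWitness_part_1_move : String × Int × String × Int × Int := ("F", 7, "E", 1, 2)

-- When direction is 'L'/'R', facing a valid compass point and amount//90 not in {1,2,3}
-- (e.g. amount 0, 45 or 360), A raises KeyError while B rotates (amount//90) % 4 quarter-turns and returns.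
def Raises_part_1_move (direction : String) (amount : Int) (facing : String) (x_pos : Int) (y_pos : Int) : Prop :=
  (direction = "L" ∨ direction = "R")
  ∧ (facing = "E" ∨ facing = "W" ∨ facing = "N" ∨ facing = "S")
  ∧ ¬(PySem.Int.floordiv amount 90 = 1 ∨ PySem.Int.floordiv amount 90 = 2 ∨ PySem.Int.floordiv amount 90 = 3)

instance (direction : String) (amount : Int) (facing : String) (x_pos : Int) (y_pos : Int) : Decidable (Raises_part_1_move direction amount facing x_pos y_pos) := by unfold Raises_part_1_move; infer_instance

def pvRaiseWitness_part_1_move : String × Int × String × Int × Int := ("L", 360, "N", 0, 0)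
def pvRaiseWitnessOut_part_1_move : Int × Int × String := (0, 0, "N")

def Spec_part_1_move (direction : String) (amount : Int) (facing : String) (x_pos : Int) (y_pos : Int) (out : Int × Int × String) : Prop := out = part_1_move_alt direction amount facing x_pos y_pos
instance (direction : String) (amount : Int) (facing : String) (x_pos : Int) (y_pos : Int) (out : Int × Int × String) : Decidable (Spec_part_1_move direction amount facing x_pos y_pos out) := by unfold Spec_part_1_move; infer_instance

-- ===== CLAIM (what is proved, stated in full; the proofs are below) =====
def Claim_equal_part_1_move : Prop := ∀ (direction : String) (amount : Int) (facing : String) (x_pos : Int) (y_pos : Int), Dom_part_1_move direction amount facing x_pos y_pos → Pre_part_1_move direction amount facing x_pos y_pos → Spec_part_1_move direction amount facing x_pos y_pos (part_1_move direction amount facing x_pos y_pos)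

def Claim_raises_part_1_move : Prop := (∀ (direction : String) (amount : Int) (facing : String) (x_pos : Int) (y_pos : Int), Dom_part_1_move direction amount facing x_pos y_pos → Raises_part_1_move direction amount facing x_pos y_pos → ¬ Pre_part_1_move direction amount facing x_pos y_pos) ∧ (Dom_part_1_move (pvRaiseWitness_part_1_move.1) (pvRaiseWitness_part_1_move.2.1) (pvRaiseWitness_part_1_move.2.2.1) (pvRaiseWitness_part_1_move.2.2.2.1) (pvRaiseWitness_part_1_move.2.2.2.2) ∧ Raises_part_1_move (pvRaiseWitness_part_1_move.1) (pvRaiseWitness_part_1_move.2.1) (pvRaiseWitness_part_1_move.2.2.1) (pvRaiseWitness_part_1_move.2.2.2.1) (pvRaiseWitness_part_1_move.2.2.2.2) ∧ part_1_move_alt (pvRaiseWitness_part_1_move.1) (pvRaiseWitness_part_1_move.2.1) (pvRaiseWitness_part_1_move.2.2.1) (pvRaiseWitness_part_1_move.2.2.2.1) (pvRaiseWitness_part_1_move.2.2.2.2) = pvRaiseWitnessOut_part_1_move)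

-- ===== LEMMAS AND PROOFS =====

-- both sides agree on a rotation once facing and the step count are concrete
theorem rot_case (d f : String) (a x y : Int)
    (hd : d = "L" ∨ d = "R") (hf : f = "E" ∨ f = "W" ∨ f = "N" ∨ f = "S")
    (hs : PySem.Int.floordiv a 90 = 1 ∨ PySem.Int.floordiv a 90 = 2 ∨ PySem.Int.floordiv a 90 = 3) :
    part_1_move d a f x y = part_1_move_alt d a f x y := by
  rcases hd with rfl | rfl <;> rcases hf with rfl | rfl | rfl | rfl <;>
    rcases hs with h | h | h <;>
    (simp only [part_1_move, part_1_move_fuel, change_face, part_1_move_alt, h]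
     simp [direction_changes, pvVEC, pvLETTER, pvRotate, PySem.Dict.get?, PySem.Dict.ofList,
       PySem.Dict.update, PySem.Dict.insert, PySem.Dict.empty, List.find?,
       PySem.Int.mod] <;> rfl)

-- both sides agree on a compass move
theorem move_case (d f : String) (a x y : Int)
    (hd : d = "N" ∨ d = "S" ∨ d = "E" ∨ d = "W") :
    part_1_move d a f x y = part_1_move_alt d a f x y := by
  rcases hd with rfl | rfl | rfl | rfl <;>
    simp [part_1_move, part_1_move_fuel, part_1_move_alt, pvVEC,
      PySem.Dict.ofList, PySem.Dict.get?, PySem.Dict.update, PySem.Dict.insert,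
      PySem.Dict.empty, List.find?] <;> ring

-- ===== VERDICT (by name: the statement is the Claim_ definition above) =====
theorem part_1_move_spec : Claim_equal_part_1_move := by
  intro d a f x y _ hpre
  unfold Spec_part_1_move
  rcases hpre with hd | ⟨hd, hf, hs⟩ | ⟨hd, hf⟩
  · exact move_case d f a x y hd
  · exact rot_case d f a x y hd hf hs
  · push_neg at hd
    obtain ⟨h1, h2, h3, h4, h5, h6⟩ := hd
    rcases hf with rfl | rfl | rfl | rfl <;>
      simp [part_1_move, part_1_move_fuel, part_1_move_alt,
        h1, h2, h3, h4, h5, h6,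
        beq_eq_false_iff_ne.mpr (Ne.symm h1), beq_eq_false_iff_ne.mpr (Ne.symm h2),
        beq_eq_false_iff_ne.mpr (Ne.symm h3), beq_eq_false_iff_ne.mpr (Ne.symm h4),
        beq_eq_false_iff_ne.mpr (Ne.symm h5), beq_eq_false_iff_ne.mpr (Ne.symm h6), pvVEC, PySem.Dict.ofList, PySem.Dict.get?,
        PySem.Dict.update, PySem.Dict.insert, PySem.Dict.empty, List.find?] <;> ring

@[simp] theorem part_1_move_raises : Claim_raises_part_1_move := by
  unfold Claim_raises_part_1_move
  refine ⟨?_, by decide⟩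
  intro d a f x y _ ⟨hd, hf, hs⟩ hpre
  rcases hpre with h | ⟨_, _, h⟩ | ⟨h, _⟩
  · rcases hd with rfl | rfl <;> simp_all
  · exact hs h
  · exact h (by tauto)
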